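-- pv_equiv track=rewrite | github.com/Srungot/Asterion-PyObfuscator | sample/oneline_imports.py | process_imports
-- ===== SOURCE A (Python) =====
-- def process_imports(content):
--     lines = content.split('\n')
--     imports = []
--     non_imports = []
--     current_imports = []
--
--     for line in lines:
--         stripped = line.strip()
--         if stripped.startswith(('import ', 'from ')):
--             current_imports.append(stripped)
--         else:
--             if current_imports:
--                 imports.append(';'.join(current_imports))
--                 current_imports = []
--             if stripped:
--                 non_imports.append(line)
--
--     if current_imports:
--         imports.append(';'.join(current_imports))
--
--     return '\n'.join(imports + [''] + non_imports) if imports else '\n'.join(non_imports)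
-- ===== SOURCE B (Python) =====
-- def process_imports(content):
--     lines = content.split('\n')
--
--     def is_imp(line):
--         return line.strip().startswith(('import ', 'from '))
--
--     imports = []
--     non_imports = []
--     i = 0
--     n = len(lines)
--     while i < n:
--         j = i + 1
--         while j < n and is_imp(lines[j]) == is_imp(lines[i]):
--             j += 1
--         group = lines[i:j]
--         if is_imp(lines[i]):
--             imports.append(';'.join(l.strip() for l in group))
--         else:
--             non_imports.extend(l for l in group if l.strip())
--         i = j
--     return '\n'.join(imports + [''] + non_imports) if imports else '\n'.join(non_imports)
-- ===== Notes on version B (the rewrite author's own statement) =====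
-- stated objective: alternative
-- what changed: Replaces the line-by-line accumulator/flush state machine with groupby-style span chunking: lines are cut into maximal runs of import/non-import lines with an inner span scan, and each run is emitted in one step (joined imports or filtered originals).
import Mathlib
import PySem

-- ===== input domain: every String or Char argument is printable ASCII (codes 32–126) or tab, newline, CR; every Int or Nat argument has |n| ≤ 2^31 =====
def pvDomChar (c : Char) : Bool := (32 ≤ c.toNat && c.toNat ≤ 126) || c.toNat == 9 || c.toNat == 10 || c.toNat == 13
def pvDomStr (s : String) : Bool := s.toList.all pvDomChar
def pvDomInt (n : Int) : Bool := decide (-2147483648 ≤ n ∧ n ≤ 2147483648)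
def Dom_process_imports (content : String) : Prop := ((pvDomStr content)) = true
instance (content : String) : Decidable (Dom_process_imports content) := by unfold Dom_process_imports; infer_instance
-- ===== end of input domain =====

-- B collapses the same import runs by groupby-style span chunking instead of A's accumulator/flush loop; same cost, alternative structure.

-- ===== PORT A =====
-- one loop step of A: state = (imports, non_imports, current_imports)
def piStepA (st : List String × List String × List String) (line : String) :
    List String × List String × List String :=
  let imports := st.1
  let non_imports := st.2.1
  let current_imports := st.2.2
  let stripped := PySem.Str.strip line
  if PySem.Str.startswith stripped "import " || PySem.Str.startswith stripped "from " then
    (imports, non_imports, current_imports ++ [stripped])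
  else
    let imports := if current_imports ≠ [] then imports ++ [PySem.Str.join ";" current_imports] else imports
    let non_imports := if stripped ≠ "" then non_imports ++ [line] else non_imports
    (imports, non_imports, ([] : List String))

def process_imports (content : String) : String :=
  let lines := (PySem.Str.split? content "\n").getD []
  let st := lines.foldl piStepA ([], [], [])
  let imports := if st.2.2 ≠ [] then st.1 ++ [PySem.Str.join ";" st.2.2] else st.1
  let non_imports := st.2.1
  if imports ≠ [] then PySem.Str.join "\n" (imports ++ [""] ++ non_imports)
  else PySem.Str.join "\n" non_imports

-- ===== PORT B =====
-- Source B's is_imp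
def piKey (line : String) : Bool :=
  PySem.Str.startswith (PySem.Str.strip line) "import " ||
    PySem.Str.startswith (PySem.Str.strip line) "from "

-- Source B's outer while loop cuts the line list into maximal runs of equal key (the inner j-scan)
def piChunks (key : String → Bool) : List String → List (Bool × List String)
  | [] => []
  | l :: ls =>
    (key l, l :: ls.takeWhile (fun x => key x == key l)) ::
      piChunks key (ls.dropWhile (fun x => key x == key l))
termination_by ls => ls.length
decreasing_by simpa using Nat.lt_succ_of_le (List.length_dropWhile_le _ _)

-- Source B's per-group body
def piStepB (st : List String × List String) (g : Bool × List String) :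
    List String × List String :=
  if g.1 then (st.1 ++ [PySem.Str.join ";" (g.2.map PySem.Str.strip)], st.2)
  else (st.1, st.2 ++ g.2.filter (fun l => PySem.Str.strip l ≠ ""))

def process_imports_alt (content : String) : String :=
  let lines := (PySem.Str.split? content "\n").getD []
  let st := (piChunks piKey lines).foldl piStepB ([], [])
  let imports := st.1
  let non_imports := st.2
  if imports ≠ [] then PySem.Str.join "\n" (imports ++ [""] ++ non_imports)
  else PySem.Str.join "\n" non_imports

-- ===== PRECONDITION & SPEC =====
def Spec_process_imports (content : String) (out : String) : Prop := out = process_imports_alt content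
instance (content : String) (out : String) : Decidable (Spec_process_imports content out) := by unfold Spec_process_imports; infer_instance

-- ===== CLAIM (what is proved, stated in full; the proofs are below) =====
def Claim_equal_process_imports : Prop := ∀ (content : String), Dom_process_imports content → Spec_process_imports content (process_imports content)

-- ===== LEMMAS AND PROOFS =====
-- A's final flush, applied to the loop state
def piFinishA (st : List String × List String × List String) : List String × List String :=
  (if st.2.2 ≠ [] then st.1 ++ [PySem.Str.join ";" st.2.2] else st.1, st.2.1)

theorem piStepA_true (st : List String × List String × List String) (line : String)
    (h : piKey line = true) :
    piStepA st line = (st.1, st.2.1, st.2.2 ++ [PySem.Str.strip line]) := by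
  have h' : (PySem.Str.startswith (PySem.Str.strip line) "import " ||
      PySem.Str.startswith (PySem.Str.strip line) "from ") = true := h
  simp only [piStepA]
  rw [h']
  simp

theorem piStepA_false (st : List String × List String × List String) (line : String)
    (h : piKey line = false) :
    piStepA st line =
      (if st.2.2 ≠ [] then st.1 ++ [PySem.Str.join ";" st.2.2] else st.1,
       if PySem.Str.strip line ≠ "" then st.2.1 ++ [line] else st.2.1, ([] : List String)) := by
  have h' : (PySem.Str.startswith (PySem.Str.strip line) "import " ||
      PySem.Str.startswith (PySem.Str.strip line) "from ") = false := h
  simp only [piStepA]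
  rw [h']
  simp

theorem run_true (r : List String) (h : ∀ x ∈ r, piKey x = true) :
    ∀ (rest imp ni cur : List String),
      List.foldl piStepA (imp, ni, cur) (r ++ rest) =
        List.foldl piStepA (imp, ni, cur ++ r.map PySem.Str.strip) rest := by
  induction r with
  | nil => simp
  | cons a r ih =>
    intro rest imp ni cur
    have ha := h a (by simp)
    rw [List.cons_append, List.foldl_cons, piStepA_true _ _ ha,
      ih (fun x hx => h x (by simp [hx]))]
    simp

theorem run_false (r : List String) (h : ∀ x ∈ r, piKey x = false) :
    ∀ (rest imp ni : List String),
      List.foldl piStepA (imp, ni, []) (r ++ rest) =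
        List.foldl piStepA (imp, ni ++ r.filter (fun l => PySem.Str.strip l ≠ ""), []) rest := by
  induction r with
  | nil => simp
  | cons a r ih =>
    intro rest imp ni
    have ha := h a (by simp)
    rw [List.cons_append, List.foldl_cons, piStepA_false _ _ ha]
    simp only [ne_eq, not_true_eq_false, if_false, List.filter_cons]
    by_cases hs : PySem.Str.strip a = "" <;>
      simp [hs, ih (fun x hx => h x (by simp [hx])), List.append_assoc]

theorem flush_early (rest : List String) (h : ∀ x ∈ rest.head?, piKey x = false)
    (imp ni c : List String) (hc : c ≠ []) :
    piFinishA (List.foldl piStepA (imp, ni, c) rest) =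
      piFinishA (List.foldl piStepA (imp ++ [PySem.Str.join ";" c], ni, []) rest) := by
  cases rest with
  | nil => simp [piFinishA, hc]
  | cons a rest =>
    have ha := h a (by simp)
    rw [List.foldl_cons, List.foldl_cons, piStepA_false _ _ ha, piStepA_false _ _ ha]
    simp [hc]

theorem head?_dropWhile_key (key : String → Bool) (l : List String) (k : Bool) :
    ∀ x ∈ (l.dropWhile (fun x => key x == k)).head?, (key x == k) = false := by
  induction l with
  | nil => simp
  | cons a l ih =>
    by_cases h : (key a == k) = true
    · simpa [List.dropWhile_cons, h] using ih
    · simp only [Bool.not_eq_true] at h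
      simp only [List.dropWhile_cons, h]
      simpa using h

theorem chunks_main : ∀ (n : ℕ) (lines : List String), lines.length ≤ n →
    ∀ imp ni : List String,
      piFinishA (List.foldl piStepA (imp, ni, []) lines) =
        List.foldl piStepB (imp, ni) (piChunks piKey lines) := by
  intro n
  induction n with
  | zero =>
    intro lines hl imp ni
    rw [List.length_eq_zero_iff.mp (Nat.le_zero.mp hl)]
    simp [piChunks, piFinishA]
  | succ n ih =>
    intro lines hl imp ni
    cases lines with
    | nil => simp [piChunks, piFinishA]
    | cons l ls =>
      have hsplit : l :: ls =
          (l :: ls.takeWhile (fun x => piKey x == piKey l)) ++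
            ls.dropWhile (fun x => piKey x == piKey l) := by
        simp [List.takeWhile_append_dropWhile]
      have hrest : (ls.dropWhile (fun x => piKey x == piKey l)).length ≤ n := by
        have := List.length_dropWhile_le (fun x => piKey x == piKey l) ls
        simp only [List.length_cons] at hl; omega
      have htake : ∀ x ∈ l :: ls.takeWhile (fun x => piKey x == piKey l), piKey x = piKey l := by
        intro x hx
        rcases List.mem_cons.mp hx with rfl | hx
        · rfl
        · simpa using List.mem_takeWhile_imp hx
      rw [piChunks]
      cases hk : piKey l with
      | true =>
        have htake' : ∀ x ∈ l :: ls.takeWhile (fun x => piKey x == piKey l), piKey x = true := by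
          intro x hx; rw [htake x hx, hk]
        rw [hsplit, run_true _ htake']
        have hhead : ∀ x ∈ (ls.dropWhile (fun x => piKey x == piKey l)).head?, piKey x = false := by
          intro x hx
          have := head?_dropWhile_key piKey ls (piKey l) x hx
          rw [hk] at this; simpa using this
        rw [List.nil_append, flush_early _ hhead _ _ _ (by simp),
          ih _ hrest]
        simp [piStepB, hk]
      | false =>
        have htake' : ∀ x ∈ l :: ls.takeWhile (fun x => piKey x == piKey l), piKey x = false := by
          intro x hx; rw [htake x hx, hk]
        rw [hsplit, run_false _ htake', ih _ hrest]
        simp [piStepB, hk]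

-- ===== VERDICT (by name: the statement is the Claim_ definition above) =====
theorem process_imports_spec : Claim_equal_process_imports := by
  intro content _
  unfold Spec_process_imports process_imports process_imports_alt
  have h := chunks_main ((PySem.Str.split? content "\n").getD []).length
    ((PySem.Str.split? content "\n").getD []) le_rfl [] []
  simp only [piFinishA, Prod.ext_iff] at h
  simp only [h.1, h.2]
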